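-- pv_equiv track=rewrite | github.com/Ag3497120/verantyx-v6 | synth_results/1a244afd.py | transform
-- ===== SOURCE A (Python) =====
-- def transform(grid):
--     rows, cols = len(grid), len(grid[0])
--     result = [row[:] for row in grid]
--     ones = [(r,c) for r in range(rows) for c in range(cols) if grid[r][c] == 1]
--     sixes = [(r,c) for r in range(rows) for c in range(cols) if grid[r][c] == 6]
--     for r1,c1 in ones:
--         six_partner = None
--         for r2,c2 in sixes:
--             if r2==r1 or c2==c1:
--                 six_partner = (r2,c2); break
--         if not six_partner: continue
--         r2,c2 = six_partner
--         dr = r2-r1; dc = c2-c1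
--         dist = abs(dr)+abs(dc)
--         dr_n = 0 if dr==0 else dr//abs(dr)
--         dc_n = 0 if dc==0 else dc//abs(dc)
--         new_dr = -dc_n; new_dc = dr_n
--         tr = r1+new_dr*dist; tc = c1+new_dc*dist
--         if 0<=tr<rows and 0<=tc<cols and grid[tr][tc]==8:
--             result[tr][tc] = 7
--     for r,c in sixes:
--         result[r][c] = 8
--     return result
-- ===== SOURCE B (Python) =====
-- def transform(grid):
--     rows, cols = len(grid), len(grid[0])
--     # index the first 6 of every row and of every column once,
--     # so each 1-cell finds its row-major-first partner by two lookups
--     row6 = [next((c for c in range(cols) if grid[r][c] == 6), None) for r in range(rows)]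
--     col6 = [next((r for r in range(rows) if grid[r][c] == 6), None) for c in range(cols)]
--     targets = set()
--     for r in range(rows):
--         for c in range(cols):
--             if grid[r][c] != 1:
--                 continue
--             cand = None
--             if row6[r] is not None:
--                 cand = (r, row6[r])
--             if col6[c] is not None and (cand is None or (col6[c], c) < cand):
--                 cand = (col6[c], c)
--             if cand is None:
--                 continue
--             r2, c2 = cand
--             if r2 == r:
--                 tr, tc = r - (c2 - c), c
--             else:
--                 tr, tc = r, c + (r2 - r)
--             if 0 <= tr < rows and 0 <= tc < cols and grid[tr][tc] == 8:
--                 targets.add((tr, tc))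
--     return [[8 if c < cols and v == 6 else 7 if (r, c) in targets else v
--              for c, v in enumerate(row)]
--             for r, row in enumerate(grid)]
-- ===== Notes on version B (the rewrite author's own statement) =====
-- stated objective: alternative
-- what changed: Instead of scanning the whole sixes list for every 1-cell, B indexes the first 6 of each row and each column once and picks each 1-cell's row-major-first partner as the lex-min of two lookups, collects rotation targets in a set, and builds the result grid functionally instead of mutating a copy.
import Mathlib
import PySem

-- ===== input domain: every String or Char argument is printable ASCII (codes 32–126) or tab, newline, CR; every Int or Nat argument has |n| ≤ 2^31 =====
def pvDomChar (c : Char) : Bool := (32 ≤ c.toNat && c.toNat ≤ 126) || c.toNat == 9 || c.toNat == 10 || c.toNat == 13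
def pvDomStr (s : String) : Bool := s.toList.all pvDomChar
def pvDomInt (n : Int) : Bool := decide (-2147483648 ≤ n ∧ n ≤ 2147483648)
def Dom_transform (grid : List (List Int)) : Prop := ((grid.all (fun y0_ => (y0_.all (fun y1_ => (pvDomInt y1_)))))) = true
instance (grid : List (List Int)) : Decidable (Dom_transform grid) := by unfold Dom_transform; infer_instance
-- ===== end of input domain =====

-- B replaces A's per-1-cell scan of the whole sixes list by per-row/per-column first-6 indexes
-- and builds the result functionally instead of mutating a copy (objective: alternative).

-- ===== PORT A =====
-- grid[r][c]; under Pre_transform every index used is in range, so the defaults are never hit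
def gridGet (grid : List (List Int)) (r c : Int) : Int :=
  PySem.List.pyGetD (PySem.List.pyGetD grid r []) c 0

-- result[r][c] = v (indices nonnegative and in range at every call site)
def set2d (m : List (List Int)) (r c v : Int) : List (List Int) :=
  m.modify r.toNat (fun row => row.set c.toNat v)

-- [(r,c) for r in range(rows) for c in range(cols) if grid[r][c] == v]
def cellsEq (grid : List (List Int)) (v : Int) : List (Int × Int) :=
  (PySem.List.pyRange 0 (grid.length : Int) 1).flatMap (fun r =>
    ((PySem.List.pyRange 0 ((PySem.List.pyGetD grid 0 []).length : Int) 1).filter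
        (fun c => gridGet grid r c == v)).map (fun c => (r, c)))

def transform (grid : List (List Int)) : List (List Int) :=
  let rows : Int := grid.length
  let cols : Int := (PySem.List.pyGetD grid 0 []).length
  let result : List (List Int) := grid.map (fun row => row)
  let ones : List (Int × Int) := cellsEq grid 1
  let sixes : List (Int × Int) := cellsEq grid 6
  let result : List (List Int) := ones.foldl (fun result p =>
    match sixes.find? (fun q => q.1 == p.1 || q.2 == p.2) with
    | none => result
    | some q =>
      let dr := q.1 - p.1
      let dc := q.2 - p.2
      let dist := |dr| + |dc|
      let dr_n : Int := if dr == 0 then 0 else PySem.Int.floordiv dr |dr|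
      let dc_n : Int := if dc == 0 then 0 else PySem.Int.floordiv dc |dc|
      let tr := p.1 + (-dc_n) * dist
      let tc := p.2 + dr_n * dist
      if 0 ≤ tr ∧ tr < rows ∧ 0 ≤ tc ∧ tc < cols ∧ gridGet grid tr tc == 8
      then set2d result tr tc 7 else result) result
  sixes.foldl (fun result p => set2d result p.1 p.2 8) result

-- ===== PORT B =====
-- tuple comparison (r2, c) < cand used by B
def lexLt (a b : Int × Int) : Bool := a.1 < b.1 || (a.1 == b.1 && a.2 < b.2)

-- row6 = [next((c for c in range(cols) if grid[r][c] == 6), None) for r in range(rows)]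
def row6 (grid : List (List Int)) : List (Option Int) :=
  (PySem.List.pyRange 0 (grid.length : Int) 1).map (fun r =>
    (PySem.List.pyRange 0 ((PySem.List.pyGetD grid 0 []).length : Int) 1).find?
      (fun c => gridGet grid r c == 6))

-- col6 = [next((r for r in range(rows) if grid[r][c] == 6), None) for c in range(cols)]
def col6 (grid : List (List Int)) : List (Option Int) :=
  (PySem.List.pyRange 0 ((PySem.List.pyGetD grid 0 []).length : Int) 1).map (fun c =>
    (PySem.List.pyRange 0 (grid.length : Int) 1).find?
      (fun r => gridGet grid r c == 6))

-- the lex-least of the row partner and the column partner (B's cand)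
def candB (r6 c6 : List (Option Int)) (r c : Int) : Option (Int × Int) :=
  let cand : Option (Int × Int) :=
    match PySem.List.pyGetD r6 r none with
    | some c2 => some (r, c2)
    | none => none
  match PySem.List.pyGetD c6 c none, cand with
  | some r2, none => some (r2, c)
  | some r2, some p => if lexLt (r2, c) p then some (r2, c) else some p
  | none, o => o

-- _target: the rotated mark position of the 1-cell (r, c), if any
def tgtB (grid : List (List Int)) (rows cols : Int) (r6 c6 : List (Option Int)) (r c : Int) :
    Option (Int × Int) :=
  match candB r6 c6 r c with
  | none => none
  | some q =>
    let t : Int × Int := if q.1 == r then (r - (q.2 - c), c) else (r, c + (q.1 - r))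
    if 0 ≤ t.1 ∧ t.1 < rows ∧ 0 ≤ t.2 ∧ t.2 < cols ∧ gridGet grid t.1 t.2 == 8
    then some t else none

def transform_alt (grid : List (List Int)) : List (List Int) :=
  let rows : Int := grid.length
  let cols : Int := (PySem.List.pyGetD grid 0 []).length
  let r6 := row6 grid
  let c6 := col6 grid
  let targets : PySem.Set (Int × Int) :=
    (PySem.List.pyRange 0 rows 1).foldl (fun tg r =>
      (PySem.List.pyRange 0 cols 1).foldl (fun tg c =>
        if gridGet grid r c == 1 then
          match tgtB grid rows cols r6 c6 r c with
          | some t => PySem.Set.add tg t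
          | none => tg
        else tg) tg) PySem.Set.empty
  (PySem.List.enumerate grid).map (fun rr =>
    (PySem.List.enumerate rr.2).map (fun cv =>
      if decide (cv.1 < cols) && (cv.2 == 6) then 8
      else if PySem.Set.contains targets (rr.1, cv.1) then 7 else cv.2))

-- ===== PRECONDITION & SPEC =====
-- A raises IndexError exactly when the grid is empty or some row is shorter than the first row
def Pre_transform (grid : List (List Int)) : Prop :=
  grid ≠ [] ∧ ∀ row ∈ grid, (PySem.List.pyGetD grid 0 []).length ≤ row.length
instance (grid : List (List Int)) : Decidable (Pre_transform grid) := by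
  unfold Pre_transform; infer_instance
def pvWitness_transform : List (List Int) := [[1, 0], [6, 8]]

def Spec_transform (grid : List (List Int)) (out : List (List Int)) : Prop := out = transform_alt grid
instance (grid : List (List Int)) (out : List (List Int)) : Decidable (Spec_transform grid out) := by unfold Spec_transform; infer_instance

-- ===== CLAIM (what is proved, stated in full; the proofs are below) =====
def Claim_equal_transform : Prop := ∀ (grid : List (List Int)), Dom_transform grid → Pre_transform grid → Spec_transform grid (transform grid)

-- ===== LEMMAS AND PROOFS =====

-- entry (i, j) of a grid, defaults only reached out of range
def get2 (m : List (List Int)) (i j : Nat) : Int := (m.getD i []).getD j 0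

theorem gridGet_natCast (grid : List (List Int)) (i j : Nat) :
    gridGet grid (i : Int) (j : Int) = get2 grid i j := by
  simp [gridGet, get2, PySem.List.pyGetD_natCast]

def write2d (v : Int) (m : List (List Int)) (w : Int × Int) : List (List Int) :=
  set2d m w.1 w.2 v

-- A's per-1-cell loop body as a partial target function (the value written is always 7)
def tgtA (grid : List (List Int)) (p : Int × Int) : Option (Int × Int) :=
  match (cellsEq grid 6).find? (fun q => q.1 == p.1 || q.2 == p.2) with
  | none => none
  | some q =>
    let dr := q.1 - p.1
    let dc := q.2 - p.2
    let dist := |dr| + |dc|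
    let dr_n : Int := if dr == 0 then 0 else PySem.Int.floordiv dr |dr|
    let dc_n : Int := if dc == 0 then 0 else PySem.Int.floordiv dc |dc|
    let tr := p.1 + (-dc_n) * dist
    let tc := p.2 + dr_n * dist
    if 0 ≤ tr ∧ tr < (grid.length : Int) ∧ 0 ≤ tc ∧ tc < ((PySem.List.pyGetD grid 0 []).length : Int)
        ∧ gridGet grid tr tc == 8
    then some (tr, tc) else none

theorem transform_eq_writes (grid : List (List Int)) :
    transform grid =
      (cellsEq grid 6).foldl (write2d 8)
        (((cellsEq grid 1).filterMap (tgtA grid)).foldl (write2d 7) grid) := by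
  simp only [transform, List.map_id']
  rw [List.foldl_filterMap]
  congr 1
  apply PySem.List.foldl_congr_mem
  intro m p _
  simp only [tgtA]
  cases hf : (cellsEq grid 6).find? (fun q => q.1 == p.1 || q.2 == p.2) with
  | none => simp
  | some q => simp only []; split_ifs <;> rfl

theorem set2d_length (m : List (List Int)) (r c v : Int) : (set2d m r c v).length = m.length := by
  simp [set2d]

theorem set2d_rowlen (m : List (List Int)) (r c v : Int) (i : Nat) :
    ((set2d m r c v).getD i []).length = (m.getD i []).length := by
  simp only [set2d, List.getD_eq_getElem?_getD, List.getElem?_modify]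
  cases h : m[i]? with
  | none => simp
  | some row => simp only [Option.map_eq_map, Option.map_some, Option.getD_some]; split <;> simp

theorem get2_set2d (m : List (List Int)) (r c v : Int) (_hr : 0 ≤ r) (_hc : 0 ≤ c)
    (hr' : r.toNat < m.length) (hc' : c.toNat < (m.getD r.toNat []).length) (i j : Nat) :
    get2 (set2d m r c v) i j = if i = r.toNat ∧ j = c.toNat then v else get2 m i j := by
  simp only [get2, set2d, List.getD_eq_getElem?_getD, List.getElem?_modify]
  by_cases hi : r.toNat = i
  · subst hi
    rw [List.getElem?_eq_getElem hr']
    have hrow : m.getD r.toNat [] = m[r.toNat] := by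
      rw [List.getD_eq_getElem?_getD, List.getElem?_eq_getElem hr']; rfl
    have hc2 : c.toNat < m[r.toNat].length := hrow ▸ hc'
    by_cases hj : j = c.toNat
    · subst hj; simp [hc2]
    · simp [hj, Ne.symm hj]
  · have hi' : i ≠ r.toNat := fun h => hi h.symm
    cases h : m[i]? with
    | none => simp [hi']
    | some row => simp [hi, hi']

theorem foldl_write2d_length (v : Int) (ws : List (Int × Int)) (m : List (List Int)) :
    (ws.foldl (write2d v) m).length = m.length := by
  induction ws generalizing m with
  | nil => rfl
  | cons w ws ih => simp [List.foldl_cons, ih, write2d, set2d_length]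

theorem foldl_write2d_rowlen (v : Int) (ws : List (Int × Int)) (m : List (List Int)) (i : Nat) :
    ((ws.foldl (write2d v) m).getD i []).length = (m.getD i []).length := by
  induction ws generalizing m with
  | nil => rfl
  | cons w ws ih =>
    rw [List.foldl_cons, ih]
    have := set2d_rowlen m w.1 w.2 v i
    simpa [write2d, List.getD_eq_getElem?_getD] using this

theorem get2_foldl_write2d (v : Int) (ws : List (Int × Int)) (m : List (List Int))
    (hws : ∀ w ∈ ws, 0 ≤ w.1 ∧ 0 ≤ w.2 ∧ w.1.toNat < m.length ∧ w.2.toNat < (m.getD w.1.toNat []).length)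
    (i j : Nat) :
    get2 (ws.foldl (write2d v) m) i j =
      if ((i : Int), (j : Int)) ∈ ws then v else get2 m i j := by
  induction ws generalizing m with
  | nil => simp
  | cons w ws ih =>
    have hw := hws w (List.mem_cons_self)
    have hrest : ∀ x ∈ ws, 0 ≤ x.1 ∧ 0 ≤ x.2 ∧ x.1.toNat < (write2d v m w).length ∧
        x.2.toNat < ((write2d v m w).getD x.1.toNat []).length := by
      intro x hx
      have hx2 := hws x (List.mem_cons_of_mem _ hx)
      refine ⟨hx2.1, hx2.2.1, ?_, ?_⟩
      · rw [write2d, set2d_length]; exact hx2.2.2.1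
      · rw [write2d, set2d_rowlen]; exact hx2.2.2.2
    rw [List.foldl_cons, ih (write2d v m w) hrest, write2d,
      get2_set2d m w.1 w.2 v hw.1 hw.2.1 hw.2.2.1 hw.2.2.2 i j]
    simp only [List.mem_cons]
    by_cases hmem : ((i : Int), (j : Int)) ∈ ws
    · simp [hmem]
    · simp only [hmem, or_false]
      have heq : (((i : Int), (j : Int)) = w) ↔ (i = w.1.toNat ∧ j = w.2.toNat) := by
        cases w with
        | mk a b => simp only [Prod.mk.injEq]; omega
      simp [heq]

-- membership in the cell lists
theorem mem_cellsEq (grid : List (List Int)) (v : Int) (x : Int × Int) :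
    x ∈ cellsEq grid v ↔
      0 ≤ x.1 ∧ x.1 < (grid.length : Int) ∧ 0 ≤ x.2 ∧
      x.2 < ((PySem.List.pyGetD grid 0 []).length : Int) ∧ gridGet grid x.1 x.2 = v := by
  simp only [cellsEq, List.mem_flatMap, List.mem_map, List.mem_filter,
    PySem.List.mem_pyRange_one]
  constructor
  · rintro ⟨r, hr, c, ⟨hc, hv⟩, rfl⟩
    simp only [beq_iff_eq] at hv
    exact ⟨hr.1, hr.2, hc.1, hc.2, hv⟩
  · rintro ⟨h1, h2, h3, h4, h5⟩
    exact ⟨x.1, ⟨h1, h2⟩, x.2, ⟨⟨h3, h4⟩, by simp [h5]⟩, rfl⟩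

theorem tgtA_some (grid : List (List Int)) (p t : Int × Int) (h : tgtA grid p = some t) :
    0 ≤ t.1 ∧ t.1 < (grid.length : Int) ∧ 0 ≤ t.2 ∧
    t.2 < ((PySem.List.pyGetD grid 0 []).length : Int) ∧ gridGet grid t.1 t.2 = 8 := by
  unfold tgtA at h
  cases hf : (cellsEq grid 6).find? (fun q => q.1 == p.1 || q.2 == p.2) with
  | none => rw [hf] at h; exact absurd h (by simp)
  | some q =>
    rw [hf] at h
    simp only [] at h
    repeat' split at h
    all_goals cases h
    all_goals (rename_i hcond; simp only [beq_iff_eq] at hcond; exact hcond)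

-- the cell lists are sorted in row-major (lexicographic) order
theorem pairwise_cellsEq (grid : List (List Int)) (v : Int) :
    (cellsEq grid v).Pairwise (fun a b => lexLt a b = true) := by
  rw [cellsEq, List.pairwise_flatMap]
  constructor
  · intro r _
    rw [List.pairwise_map]
    refine ((PySem.List.pairwise_lt_pyRange_one 0 _).filter _).imp ?_
    intro x y hxy
    simp [lexLt, hxy]
  · refine (PySem.List.pairwise_lt_pyRange_one 0 _).imp ?_
    intro r1 r2 hr x hx y hy
    simp only [List.mem_map] at hx hy
    obtain ⟨c1, _, rfl⟩ := hx
    obtain ⟨c2, _, rfl⟩ := hy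
    simp [lexLt, hr]

theorem lexLt_asymm (a b : Int × Int) (h : lexLt a b = true) : lexLt b a = false := by
  rcases a with ⟨a1, a2⟩; rcases b with ⟨b1, b2⟩
  simp only [lexLt, Bool.or_eq_true, decide_eq_true_eq, Bool.and_eq_true, beq_iff_eq] at h
  simp only [lexLt, Bool.or_eq_false_iff, Bool.and_eq_false_iff, decide_eq_false_iff_not,
    beq_eq_false_iff_ne, ne_eq]
  omega

def minOpt : Option (Int × Int) → Option (Int × Int) → Option (Int × Int)
  | none, o => o
  | some a, none => some a
  | some a, some b => if lexLt b a then some b else some a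

theorem find?_or_eq_minOpt (l : List (Int × Int)) (hp : l.Pairwise (fun a b => lexLt a b = true))
    (p q : Int × Int → Bool) :
    l.find? (fun x => p x || q x) = minOpt (l.find? p) (l.find? q) := by
  induction l with
  | nil => rfl
  | cons x t ih =>
    rw [List.pairwise_cons] at hp
    obtain ⟨hx, ht⟩ := hp
    by_cases hpx : p x = true
    · rw [List.find?_cons_of_pos (by simp [hpx]), List.find?_cons_of_pos hpx]
      by_cases hqx : q x = true
      · rw [List.find?_cons_of_pos hqx]
        simp [minOpt]
      · rw [List.find?_cons_of_neg hqx]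
        cases hq : t.find? q with
        | none => rfl
        | some b =>
          have hb : lexLt x b = true := hx b (List.mem_of_find?_eq_some hq)
          simp [minOpt, lexLt_asymm x b hb]
    · by_cases hqx : q x = true
      · rw [List.find?_cons_of_pos (by simp [hqx]), List.find?_cons_of_neg hpx,
          List.find?_cons_of_pos hqx]
        cases hp' : t.find? p with
        | none => rfl
        | some a =>
          have ha : lexLt x a = true := hx a (List.mem_of_find?_eq_some hp')
          simp [minOpt, ha]
      · rw [List.find?_cons_of_neg (by simp [hpx, hqx]), List.find?_cons_of_neg hpx,
          List.find?_cons_of_neg hqx]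
        exact ih ht

theorem find?_fst (grid : List (List Int)) (r1 : Int) (h0 : 0 ≤ r1) (h1 : r1 < (grid.length : Int)) :
    (cellsEq grid 6).find? (fun s => s.1 == r1) =
      ((PySem.List.pyRange 0 ((PySem.List.pyGetD grid 0 []).length : Int) 1).find?
        (fun c => gridGet grid r1 c == 6)).map (fun c => (r1, c)) := by
  have hsplit : PySem.List.pyRange 0 (grid.length : Int) 1 =
      PySem.List.pyRange 0 r1 1 ++ PySem.List.pyRange r1 (grid.length : Int) 1 :=
    PySem.List.pyRange_one_append 0 r1 _ h0 (le_of_lt h1)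
  rw [cellsEq, hsplit, PySem.List.pyRange_one_cons h1, List.flatMap_append, List.flatMap_cons,
    List.find?_append, List.find?_append]
  have hlow : ((PySem.List.pyRange 0 r1 1).flatMap (fun r =>
      ((PySem.List.pyRange 0 ((PySem.List.pyGetD grid 0 []).length : Int) 1).filter
        (fun c => gridGet grid r c == 6)).map (fun c => (r, c)))).find? (fun s => s.1 == r1) = none := by
    rw [List.find?_eq_none]
    intro x hx
    simp only [List.mem_flatMap, List.mem_map, PySem.List.mem_pyRange_one] at hx
    obtain ⟨r, hr, c, _, rfl⟩ := hx
    simp only [beq_iff_eq]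
    omega
  have hhigh : ((PySem.List.pyRange (r1 + 1) (grid.length : Int) 1).flatMap (fun r =>
      ((PySem.List.pyRange 0 ((PySem.List.pyGetD grid 0 []).length : Int) 1).filter
        (fun c => gridGet grid r c == 6)).map (fun c => (r, c)))).find? (fun s => s.1 == r1) = none := by
    rw [List.find?_eq_none]
    intro x hx
    simp only [List.mem_flatMap, List.mem_map, PySem.List.mem_pyRange_one] at hx
    obtain ⟨r, hr, c, _, rfl⟩ := hx
    simp only [beq_iff_eq]
    omega
  rw [hlow, hhigh, Option.none_or, Option.or_none, List.find?_map]
  have hcomp : ((fun s : Int × Int => s.1 == r1) ∘ (fun c => (r1, c))) = fun _ => true := by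
    funext c; simp
  rw [hcomp]
  have htrue : ∀ (l : List Int), l.find? (fun _ => true) = l.head? := by
    intro l; cases l <;> simp [List.find?]
  rw [htrue, List.head?_filter]

theorem find?_filter_nodup (P : Int → Bool) (l : List Int) (hn : l.Nodup) (c1 : Int)
    (hc : c1 ∈ l) :
    (l.filter P).find? (fun x => x == c1) = if P c1 then some c1 else none := by
  induction l with
  | nil => cases hc
  | cons a t ih =>
    rw [List.nodup_cons] at hn
    rcases List.mem_cons.mp hc with rfl | hct
    · rw [List.filter_cons]
      by_cases hP : P c1
      · rw [if_pos hP, List.find?_cons_of_pos (by simp), if_pos hP]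
      · rw [if_neg hP, if_neg hP, List.find?_eq_none]
        intro x hx
        simp only [beq_iff_eq]
        exact fun h => hn.1 (h ▸ List.mem_of_mem_filter hx)
    · have hne : a ≠ c1 := fun h => hn.1 (h ▸ hct)
      rw [List.filter_cons]
      by_cases hP : P a
      · rw [if_pos hP, List.find?_cons_of_neg (by simp [hne]), ih hn.2 hct]
      · rw [if_neg hP, ih hn.2 hct]

theorem find?_snd (grid : List (List Int)) (c1 : Int) (h0 : 0 ≤ c1)
    (h1 : c1 < ((PySem.List.pyGetD grid 0 []).length : Int)) :
    (cellsEq grid 6).find? (fun s => s.2 == c1) =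
      ((PySem.List.pyRange 0 (grid.length : Int) 1).find?
        (fun r => gridGet grid r c1 == 6)).map (fun r => (r, c1)) := by
  rw [cellsEq]
  generalize PySem.List.pyRange 0 (grid.length : Int) 1 = rs
  induction rs with
  | nil => rfl
  | cons r rs ih =>
    rw [List.flatMap_cons, List.find?_append, List.find?_map]
    have hcomp : ((fun s : Int × Int => s.2 == c1) ∘ (fun c => (r, c))) = fun c => c == c1 := by
      funext c; simp
    rw [hcomp, find?_filter_nodup _ _ (PySem.List.nodup_pyRange_one 0 _) c1
      (by rw [PySem.List.mem_pyRange_one]; exact ⟨h0, h1⟩)]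
    by_cases hv : gridGet grid r c1 == 6
    · rw [if_pos hv, List.find?_cons_of_pos (p := fun r' => gridGet grid r' c1 == 6) hv]
      simp
    · rw [if_neg hv, List.find?_cons_of_neg (p := fun r' => gridGet grid r' c1 == 6) hv]
      simpa using ih

theorem floordiv_sign (d : Int) (hd : d ≠ 0) : PySem.Int.floordiv d |d| * |d| = d := by
  rcases lt_or_gt_of_ne hd with hneg | hpos
  · rw [abs_of_neg hneg, PySem.Int.floordiv_eq_ediv_of_pos (by omega), Int.ediv_neg,
      Int.ediv_self hd]
    ring
  · rw [abs_of_pos hpos, PySem.Int.floordiv_eq_ediv_of_pos hpos, Int.ediv_self hd]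
    ring

-- the find-first-partner scan equals B's two-lookup candidate
theorem find?_eq_candB (grid : List (List Int)) (p : Int × Int)
    (h1 : 0 ≤ p.1) (h2 : p.1 < (grid.length : Int)) (h3 : 0 ≤ p.2)
    (h4 : p.2 < ((PySem.List.pyGetD grid 0 []).length : Int)) :
    (cellsEq grid 6).find? (fun q => q.1 == p.1 || q.2 == p.2) =
      candB (row6 grid) (col6 grid) p.1 p.2 := by
  rw [find?_or_eq_minOpt (cellsEq grid 6) (pairwise_cellsEq grid 6)
      (fun q => q.1 == p.1) (fun q => q.2 == p.2),
    find?_fst grid p.1 h1 h2, find?_snd grid p.2 h3 h4, candB, row6, col6,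
    PySem.List.pyGetD_map_pyRange_of_nonneg _ _ _ _ h1 h2,
    PySem.List.pyGetD_map_pyRange_of_nonneg _ _ _ _ h3 h4]
  cases horow : (PySem.List.pyRange 0 ((PySem.List.pyGetD grid 0 []).length : Int) 1).find?
      (fun c => gridGet grid p.1 c == 6) with
  | none =>
    cases hocol : (PySem.List.pyRange 0 (grid.length : Int) 1).find?
        (fun r => gridGet grid r p.2 == 6) with
    | none => rfl
    | some r2 => rfl
  | some c2 =>
    cases hocol : (PySem.List.pyRange 0 (grid.length : Int) 1).find?
        (fun r => gridGet grid r p.2 == 6) with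
    | none => rfl
    | some r2 => simp [minOpt]

-- the rotated-target computations agree
theorem tgtA_eq_tgtB (grid : List (List Int)) (p : Int × Int) (hp : p ∈ cellsEq grid 1) :
    tgtA grid p =
      tgtB grid (grid.length : Int) ((PySem.List.pyGetD grid 0 []).length : Int)
        (row6 grid) (col6 grid) p.1 p.2 := by
  obtain ⟨hp1, hp2, hp3, hp4, hp5⟩ := (mem_cellsEq grid 1 p).mp hp
  rw [tgtA, tgtB, ← find?_eq_candB grid p hp1 hp2 hp3 hp4]
  cases hf : (cellsEq grid 6).find? (fun q => q.1 == p.1 || q.2 == p.2) with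
  | none => rfl
  | some q =>
    have hpred := List.find?_some hf
    simp only [Bool.or_eq_true, beq_iff_eq] at hpred
    have hq6 := ((mem_cellsEq grid 6 q).mp (List.mem_of_find?_eq_some hf)).2.2.2.2
    have hqp : q ≠ p := by
      intro h
      rw [h, ← Prod.mk.eta (p := p)] at hq6
      rw [hq6] at hp5
      exact absurd hp5 (by norm_num)
    simp only []
    by_cases hq1 : q.1 = p.1
    · have hq2 : q.2 - p.2 ≠ 0 := by
        intro h
        exact hqp (Prod.ext_iff.mpr ⟨hq1, by omega⟩)
      have e1 : (q.1 - p.1 == 0) = true := by simp; omega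
      have e2 : (q.2 - p.2 == 0) = false := by simp; omega
      have hbeq : (q.1 == p.1) = true := by simp [hq1]
      have habs0 : |q.1 - p.1| = 0 := by rw [abs_eq_zero]; omega
      have hfd := floordiv_sign (q.2 - p.2) hq2
      simp only [e1, e2, hbeq, if_true, Bool.false_eq_true, if_false, neg_mul, habs0, zero_add,
        zero_mul, add_zero]
      rw [show p.1 + -(PySem.Int.floordiv (q.2 - p.2) |q.2 - p.2| * |q.2 - p.2|)
          = p.1 - (q.2 - p.2) from by rw [hfd]; ring]
    · have hq2 : q.2 = p.2 := hpred.resolve_left hq1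
      have hdr : q.1 - p.1 ≠ 0 := by omega
      have e1 : (q.1 - p.1 == 0) = false := by simp; omega
      have e2 : (q.2 - p.2 == 0) = true := by simp; omega
      have hbeq : (q.1 == p.1) = false := by simp [hq1]
      have habs0 : |q.2 - p.2| = 0 := by rw [abs_eq_zero]; omega
      have hfd := floordiv_sign (q.1 - p.1) hdr
      simp only [e1, e2, hbeq, if_true, Bool.false_eq_true, if_false, neg_zero, habs0, add_zero,
        zero_mul, add_zero]
      rw [show p.2 + PySem.Int.floordiv (q.1 - p.1) |q.1 - p.1| * |q.1 - p.1|
          = p.2 + (q.1 - p.1) from by rw [hfd]]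

theorem foldl_foldl_flatMap {α : Type} (rs cs : List Int) (f : α → Int → Int → α) (init : α) :
    rs.foldl (fun a r => cs.foldl (fun a c => f a r c) a) init =
      (rs.flatMap (fun r => cs.map (fun c => (r, c)))).foldl (fun a p => f a p.1 p.2) init := by
  induction rs generalizing init with
  | nil => rfl
  | cons r rs ih =>
    rw [List.foldl_cons, List.flatMap_cons, List.foldl_append, List.foldl_map, ih]

-- B's target set is the list of A's 7-writes
theorem targets_eq (grid : List (List Int)) :
    ((PySem.List.pyRange 0 (grid.length : Int) 1).foldl (fun tg r =>
      (PySem.List.pyRange 0 ((PySem.List.pyGetD grid 0 []).length : Int) 1).foldl (fun tg c =>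
        if gridGet grid r c == 1 then
          match tgtB grid (grid.length : Int) ((PySem.List.pyGetD grid 0 []).length : Int)
              (row6 grid) (col6 grid) r c with
          | some t => PySem.Set.add tg t
          | none => tg
        else tg) tg) PySem.Set.empty) =
      PySem.Set.ofList ((cellsEq grid 1).filterMap (tgtA grid)) := by
  rw [foldl_foldl_flatMap]
  rw [PySem.List.foldl_if_eq_foldl_filter (fun p : Int × Int => gridGet grid p.1 p.2 == 1)]
  rw [List.filter_flatMap]
  simp only [List.filter_map, Function.comp_def]
  rw [PySem.Set.ofList_eq_foldl, List.foldl_filterMap]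
  rw [show (PySem.Set.empty : PySem.Set (Int × Int)) = [] from rfl]
  rw [cellsEq]
  apply PySem.List.foldl_congr_mem
  intro acc p hp
  rw [tgtA_eq_tgtB grid p (by rw [cellsEq]; exact hp)]
  cases tgtB grid (grid.length : Int) ((PySem.List.pyGetD grid 0 []).length : Int)
      (row6 grid) (col6 grid) p.1 p.2 <;> rfl

theorem get2_eq_getElem (m : List (List Int)) (i j : Nat) (hi : i < m.length)
    (hj : j < m[i].length) : get2 m i j = m[i][j] := by
  rw [get2, List.getD_eq_getElem m [] hi, List.getD_eq_getElem m[i] 0 hj]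

theorem contains_ofList (l : List (Int × Int)) (x : Int × Int) :
    PySem.Set.contains (PySem.Set.ofList l) x = true ↔ x ∈ l := by
  rw [PySem.Set.contains, List.contains_iff_mem, PySem.Set.mem_ofList]

-- ===== VERDICT (by name: the statement is the Claim_ definition above) =====
theorem transform_spec : Claim_equal_transform := by
  intro grid _ hpre
  obtain ⟨hne, hrowsge⟩ := hpre
  unfold Spec_transform
  have hrowlen : ∀ i : Nat, i < grid.length →
      (PySem.List.pyGetD grid 0 []).length ≤ (grid.getD i []).length := by
    intro i hi
    rw [List.getD_eq_getElem grid [] hi]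
    exact hrowsge _ (List.getElem_mem hi)
  have h6 : ∀ w ∈ cellsEq grid 6, 0 ≤ w.1 ∧ 0 ≤ w.2 ∧ w.1.toNat < grid.length ∧
      w.2.toNat < (grid.getD w.1.toNat []).length := by
    intro w hw
    obtain ⟨a1, a2, a3, a4, _⟩ := (mem_cellsEq grid 6 w).mp hw
    refine ⟨a1, a3, by omega, ?_⟩
    have := hrowlen w.1.toNat (by omega)
    omega
  have hW : ∀ w ∈ (cellsEq grid 1).filterMap (tgtA grid), 0 ≤ w.1 ∧ 0 ≤ w.2 ∧
      w.1.toNat < grid.length ∧ w.2.toNat < (grid.getD w.1.toNat []).length := by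
    intro w hw
    obtain ⟨p, _, hpw⟩ := List.mem_filterMap.mp hw
    obtain ⟨a1, a2, a3, a4, _⟩ := tgtA_some grid p w hpw
    refine ⟨a1, a3, by omega, ?_⟩
    have := hrowlen w.1.toNat (by omega)
    omega
  rw [transform_eq_writes]
  simp only [transform_alt]
  rw [targets_eq]
  set W := (cellsEq grid 1).filterMap (tgtA grid) with hWdef
  set M7 := W.foldl (write2d 7) grid with hM7def
  have hM7len : M7.length = grid.length := foldl_write2d_length 7 W grid
  have hM7row : ∀ i : Nat, (M7.getD i []).length = (grid.getD i []).length :=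
    fun i => foldl_write2d_rowlen 7 W grid i
  have h6' : ∀ w ∈ cellsEq grid 6, 0 ≤ w.1 ∧ 0 ≤ w.2 ∧ w.1.toNat < M7.length ∧
      w.2.toNat < (M7.getD w.1.toNat []).length := by
    intro w hw
    obtain ⟨a1, a2, a3, a4⟩ := h6 w hw
    exact ⟨a1, a2, by rw [hM7len]; exact a3, by rw [hM7row]; exact a4⟩
  have hAlen : ((cellsEq grid 6).foldl (write2d 8) M7).length = grid.length := by
    rw [foldl_write2d_length, hM7len]
  have hArow : ∀ i : Nat,
      (((cellsEq grid 6).foldl (write2d 8) M7).getD i []).length = (grid.getD i []).length := by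
    intro i
    rw [foldl_write2d_rowlen, hM7row]
  refine List.ext_getElem ?_ ?_
  · rw [hAlen]
    simp [PySem.List.length_enumerate]
  · intro i hiA hiB
    have hig : i < grid.length := by rw [← hAlen]; exact hiA
    rw [List.getElem_map, PySem.List.getElem_enumerate]
    simp only [zero_add]
    have hrowA : (((cellsEq grid 6).foldl (write2d 8) M7))[i] =
        ((cellsEq grid 6).foldl (write2d 8) M7).getD i [] :=
      (List.getD_eq_getElem _ [] hiA).symm
    refine List.ext_getElem ?_ ?_
    · rw [hrowA, hArow i, List.getD_eq_getElem grid [] hig]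
      simp [PySem.List.length_enumerate]
    · intro j hjA hjB
      have hjg : j < grid[i].length := by
        rw [hrowA, hArow i, List.getD_eq_getElem grid [] hig] at hjA
        exact hjA
      rw [List.getElem_map, PySem.List.getElem_enumerate]
      simp only [zero_add]
      have hjA' : j < ((cellsEq grid 6).foldl (write2d 8) M7)[i].length := hjA
      rw [← get2_eq_getElem _ i j hiA hjA']
      rw [get2_foldl_write2d 8 (cellsEq grid 6) M7 h6' i j]
      rw [get2_foldl_write2d 7 W grid hW i j]
      have hgg : gridGet grid (i : Int) (j : Int) = grid[i][j] := by
        rw [gridGet_natCast, get2_eq_getElem grid i j hig hjg]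
      have hc6 : ((i : Int), (j : Int)) ∈ cellsEq grid 6 ↔
          ((j : Int) < ((PySem.List.pyGetD grid 0 []).length : Int) ∧ grid[i][j] = 6) := by
        rw [mem_cellsEq]
        simp only [hgg]
        constructor
        · rintro ⟨_, _, _, h4, h5⟩; exact ⟨h4, h5⟩
        · rintro ⟨h4, h5⟩
          exact ⟨by positivity, by exact_mod_cast hig, by positivity, h4, h5⟩
      have hget2g : get2 grid i j = grid[i][j] := get2_eq_getElem grid i j hig hjg
      by_cases h6m : ((j : Int) < ((PySem.List.pyGetD grid 0 []).length : Int) ∧ grid[i][j] = 6)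
      · rw [if_pos (hc6.mpr h6m)]
        have hbool : (decide ((j : Int) < ((PySem.List.pyGetD grid 0 []).length : Int))
            && (grid[i][j] == 6)) = true := by
          simp only [Bool.and_eq_true, decide_eq_true_eq, beq_iff_eq]
          exact ⟨h6m.1, h6m.2⟩
        rw [if_pos hbool]
      · rw [if_neg (fun h => h6m (hc6.mp h))]
        have hbool : ¬ ((decide ((j : Int) < ((PySem.List.pyGetD grid 0 []).length : Int))
            && (grid[i][j] == 6)) = true) := by
          simp only [Bool.and_eq_true, decide_eq_true_eq, beq_iff_eq]
          exact fun h => h6m h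
        rw [if_neg hbool]
        by_cases h7m : ((i : Int), (j : Int)) ∈ W
        · rw [if_pos h7m, if_pos ((contains_ofList W _).mpr h7m)]
        · rw [if_neg h7m, if_neg (fun h => h7m ((contains_ofList W _).mp h)), hget2g]
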